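-- pv_equiv track=rewrite | github.com/dekuNukem/usb4vc-configurator | src/usb4vc_config.py | clean_input
-- ===== SOURCE A (Python) =====
-- invalid_filename_characters = ['<', '>', ':', '"', '/', '\\', '|', '?', '*', ' ']
--
-- def clean_input(str_input, len_limit=None, clean_filename=False):
--     result = ''.join([x for x in str_input if 32 <= ord(x) <= 126 and x not in invalid_filename_characters])
--     if clean_filename is False:
--         result = ''.join([x for x in str_input if 32 <= ord(x) <= 126])
--     while('  ' in result):
--         result = result.replace('  ', ' ')
--     if len_limit is not None:
--         result = result[:len_limit]
--     return result.strip()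
-- ===== SOURCE B (Python) =====
-- invalid_filename_characters = ['<', '>', ':', '"', '/', '\\', '|', '?', '*', ' ']
--
-- def clean_input(str_input, len_limit=None, clean_filename=False):
--     # single pass: filter and collapse runs of spaces together, then truncate, then strip
--     out = []
--     prev_space = False
--     for x in str_input:
--         o = ord(x)
--         if o < 32 or o > 126:
--             continue
--         if clean_filename and x in invalid_filename_characters:
--             continue
--         if x == ' ':
--             if prev_space:
--                 continue
--             prev_space = True
--         else:
--             prev_space = False
--         out.append(x)
--     result = ''.join(out)
--     if len_limit is not None:
--         result = result[:len_limit]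
--     return result.strip()
-- ===== Notes on version B (the rewrite author's own statement) =====
-- stated objective: alternative
-- what changed: Replaces A's two list-comprehension filter passes plus the repeated whole-string double-space replace loop with one stateful linear pass that filters and collapses space runs using a prev_was_space flag, then truncates and strips.
import Mathlib
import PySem

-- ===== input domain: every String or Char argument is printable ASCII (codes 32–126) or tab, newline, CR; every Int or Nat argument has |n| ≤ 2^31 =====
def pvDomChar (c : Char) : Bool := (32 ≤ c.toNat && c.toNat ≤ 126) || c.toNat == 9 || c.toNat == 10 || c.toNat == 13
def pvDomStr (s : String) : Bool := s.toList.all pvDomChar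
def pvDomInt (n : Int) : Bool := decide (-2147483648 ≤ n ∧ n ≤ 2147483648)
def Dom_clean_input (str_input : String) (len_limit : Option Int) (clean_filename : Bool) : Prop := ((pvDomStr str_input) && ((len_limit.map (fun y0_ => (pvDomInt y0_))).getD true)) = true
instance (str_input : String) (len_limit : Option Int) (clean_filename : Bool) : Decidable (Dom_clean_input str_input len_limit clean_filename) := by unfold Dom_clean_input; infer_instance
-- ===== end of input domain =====

-- B fuses A's filter passes and A's repeated replace('  ',' ') loop into one linear
-- pass with a prev-space flag; truncation and strip are unchanged. (objective: alternative)

-- ===== PORT A =====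
def invalid_filename_characters : List Char := ['<', '>', ':', '"', '/', '\\', '|', '?', '*', ' ']

-- A's 'while "  " in result: result = result.replace("  ", " ")' loop; fuel = result.length
-- bounds the iteration count (replace with "  " present strictly shortens the string)
def cleanCollapse : Nat → List Char → List Char
  | 0, result => result
  | fuel + 1, result =>
    if PySem.Chars.isIn [' ', ' '] result then
      cleanCollapse fuel (PySem.Chars.replace result [' ', ' '] [' '])
    else result

def clean_input (str_input : String) (len_limit : Option Int) (clean_filename : Bool) : String :=
  let s := str_input.toList
  let result := s.filter (fun x => decide (32 ≤ x.toNat) && decide (x.toNat ≤ 126)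
                                    && !(invalid_filename_characters.contains x))
  let result := if clean_filename = false then
                  s.filter (fun x => decide (32 ≤ x.toNat) && decide (x.toNat ≤ 126))
                else result
  let result := cleanCollapse result.length result
  let result := match len_limit with
    | some n => PySem.List.slice result none (some n)
    | none => result
  String.ofList (PySem.Chars.strip result)

-- ===== PORT B =====
-- one pass with a prev_space flag: skip non-printables, skip invalid filename chars when
-- clean_filename, skip a space whenever the previously kept char was already a space
def cleanGo (cf : Bool) : Bool → List Char → List Char
  | _, [] => []
  | prev, x :: rest =>
    if x.toNat < 32 || 126 < x.toNat then cleanGo cf prev rest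
    else if cf && invalid_filename_characters.contains x then cleanGo cf prev rest
    else if x = ' ' then
      if prev then cleanGo cf prev rest
      else ' ' :: cleanGo cf true rest
    else x :: cleanGo cf false rest

def clean_input_alt (str_input : String) (len_limit : Option Int) (clean_filename : Bool) : String :=
  let result := cleanGo clean_filename false str_input.toList
  let result := match len_limit with
    | some n => PySem.List.slice result none (some n)
    | none => result
  String.ofList (PySem.Chars.strip result)

-- ===== PRECONDITION & SPEC =====
def Spec_clean_input (str_input : String) (len_limit : Option Int) (clean_filename : Bool) (out : String) : Prop := out = clean_input_alt str_input len_limit clean_filename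
instance (str_input : String) (len_limit : Option Int) (clean_filename : Bool) (out : String) : Decidable (Spec_clean_input str_input len_limit clean_filename out) := by unfold Spec_clean_input; infer_instance

-- ===== CLAIM (what is proved, stated in full; the proofs are below) =====
def Claim_equal_clean_input : Prop := ∀ (str_input : String) (len_limit : Option Int) (clean_filename : Bool), Dom_clean_input str_input len_limit clean_filename → Spec_clean_input str_input len_limit clean_filename (clean_input str_input len_limit clean_filename)

-- ===== LEMMAS AND PROOFS =====

-- proof-side model of the space-collapsing pass (prev = "previously kept char was a space")
def sqz : Bool → List Char → List Char
  | _, [] => []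
  | prev, x :: rest =>
    if x = ' ' then
      if prev then sqz prev rest else ' ' :: sqz true rest
    else x :: sqz false rest

-- the effective character filter of both programs
def keepC (cf : Bool) (x : Char) : Bool :=
  decide (32 ≤ x.toNat) && decide (x.toNat ≤ 126) && !(cf && invalid_filename_characters.contains x)

-- one application of replace(s, "  ", " "): left-to-right non-overlapping pair collapsing
def halve : List Char → List Char
  | [] => []
  | [c] => [c]
  | a :: b :: t => if a = ' ' ∧ b = ' ' then ' ' :: halve t else a :: halve (b :: t)

-- does the list contain two adjacent spaces?
def hasDbl : List Char → Bool
  | [] => false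
  | [_] => false
  | a :: b :: t => (a = ' ' && b = ' ') || hasDbl (b :: t)

theorem cleanGo_cons (cf prev : Bool) (x : Char) (rest : List Char) :
    cleanGo cf prev (x :: rest) =
      (if x.toNat < 32 || 126 < x.toNat then cleanGo cf prev rest
       else if cf && invalid_filename_characters.contains x then cleanGo cf prev rest
       else if x = ' ' then
         (if prev then cleanGo cf prev rest else ' ' :: cleanGo cf true rest)
       else x :: cleanGo cf false rest) := rfl

theorem cleanGo_eq_sqz_filter (cf : Bool) (l : List Char) : ∀ (prev : Bool),
    cleanGo cf prev l = sqz prev (l.filter (keepC cf)) := by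
  induction l with
  | nil => intro prev; simp [cleanGo, sqz]
  | cons x rest ih =>
    intro prev
    rw [cleanGo_cons]
    by_cases h1 : x.toNat < 32 ∨ 126 < x.toNat
    · have hk : keepC cf x = false := by simp [keepC]; omega
      have hcond : (x.toNat < 32 || 126 < x.toNat) = true := by simp; omega
      rw [if_pos hcond]
      simp [hk, ih]
    · push_neg at h1
      have hcond : ¬ ((x.toNat < 32 || 126 < x.toNat) = true) := by simp; omega
      rw [if_neg hcond]
      by_cases h2 : (cf && invalid_filename_characters.contains x) = true
      · have hk : keepC cf x = false := by
          simp only [keepC, h2, Bool.not_true, Bool.and_false]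
        rw [if_pos h2]
        simp [hk, ih]
      · have h2' : (cf && invalid_filename_characters.contains x) = false := by
          simpa using h2
        have hk : keepC cf x = true := by
          simp only [keepC, h2', Bool.not_false, Bool.and_true, Bool.and_eq_true,
            decide_eq_true_eq]
          omega
        rw [if_neg h2]
        simp only [List.filter_cons, hk, if_true, sqz]
        by_cases hx : x = ' ' <;> simp [hx, ih]

theorem hasDbl_iff_infix (l : List Char) : hasDbl l = true ↔ [' ', ' '] <:+: l := by
  induction l using hasDbl.induct with
  | case1 => simp [hasDbl]
  | case2 c =>
    simp only [hasDbl, Bool.false_eq_true, false_iff]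
    rintro ⟨s₁, s₂, h⟩
    have := congrArg List.length h
    simp at this
    omega
  | case3 a b t ih =>
    constructor
    · intro h
      rcases (by simpa [hasDbl] using h : (a = ' ' ∧ b = ' ') ∨ hasDbl (b :: t) = true) with
        ⟨rfl, rfl⟩ | h'
      · exact ⟨[], t, by simp⟩
      · obtain ⟨s₁, s₂, hh⟩ := ih.mp h'
        exact ⟨a :: s₁, s₂, by simpa using hh⟩
    · rintro ⟨s₁, s₂, h⟩
      cases s₁ with
      | nil =>
        simp only [List.nil_append, List.cons_append, List.cons.injEq] at h
        obtain ⟨rfl, rfl, rfl⟩ := h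
        simp [hasDbl]
      | cons u s₁' =>
        simp only [List.cons_append, List.cons.injEq] at h
        obtain ⟨rfl, h⟩ := h
        have : hasDbl (b :: t) = true := ih.mpr ⟨s₁', s₂, by simpa using h⟩
        simp [hasDbl, this]

theorem sqz_halve (t : List Char) : ∀ prev, sqz prev (halve t) = sqz prev t := by
  induction t using halve.induct with
  | case1 => intro prev; rfl
  | case2 c => intro prev; rfl
  | case3 a b t h ih =>
    obtain ⟨rfl, rfl⟩ := h
    intro prev
    cases prev <;> simp [halve, sqz, ih]
  | case4 a b t h ih =>
    intro prev
    by_cases ha : a = ' '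
    · have hb : ¬ b = ' ' := fun hb => h ⟨ha, hb⟩
      subst ha
      cases prev <;> simp [halve, h, sqz, hb, ih]
    · simp [halve, h, sqz, ha, ih]

theorem hasDbl_cons (a : Char) (rest : List Char) :
    hasDbl (a :: rest) = false ↔ hasDbl rest = false ∧ ¬(a = ' ' ∧ rest.head? = some ' ') := by
  cases rest <;> simp [hasDbl] <;> tauto

theorem sqz_id (t : List Char) : ∀ (prev : Bool), hasDbl t = false →
    (prev = true → t.head? ≠ some ' ') → sqz prev t = t := by
  induction t with
  | nil => intro prev _ _; rfl
  | cons a rest ih =>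
    intro prev hd hp
    obtain ⟨hrest, hna⟩ := (hasDbl_cons a rest).mp hd
    by_cases ha : a = ' '
    · have hprev : prev = false := by
        cases prev
        · rfl
        · exact absurd (by simp [ha]) (hp rfl)
      subst hprev
      have hnh : rest.head? ≠ some ' ' := fun hh => hna ⟨ha, hh⟩
      simp [sqz, ha, ih true hrest (fun _ => hnh)]
    · simp [sqz, ha, ih false hrest (by simp)]

theorem halve_length_le (t : List Char) : (halve t).length ≤ t.length := by
  induction t using halve.induct with
  | case1 => simp [halve]
  | case2 c => simp [halve]
  | case3 a b t h ih => obtain ⟨rfl, rfl⟩ := h; simp [halve]; omega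
  | case4 a b t h ih => simp [halve, h]; simpa using ih

theorem halve_length_lt (t : List Char) : hasDbl t = true → (halve t).length < t.length := by
  induction t using halve.induct with
  | case1 => simp [hasDbl]
  | case2 c => simp [hasDbl]
  | case3 a b t h ih =>
    obtain ⟨rfl, rfl⟩ := h
    intro _
    have := halve_length_le t
    simp [halve]; omega
  | case4 a b t h ih =>
    intro hd
    have ht : hasDbl (b :: t) = true := by
      rcases (by simpa [hasDbl] using hd : (a = ' ' ∧ b = ' ') ∨ hasDbl (b :: t) = true) with
        h' | h'
      · exact absurd h' h
      · exact h'
    have := ih ht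
    simp [halve, h]
    simpa using this

theorem replace_go_eq_halve : ∀ (fuel : Nat) (l acc : List Char), l.length ≤ fuel →
    PySem.Chars.replace.go [' ', ' '] [' '] fuel l acc = acc.reverse ++ halve l := by
  intro fuel
  induction fuel with
  | zero =>
    intro l acc h
    have : l = [] := by cases l <;> simp_all
    subst this
    simp [PySem.Chars.replace.go, halve]
  | succ fuel ih =>
    intro l acc h
    match l with
    | [] => simp [PySem.Chars.replace.go, halve]
    | c :: t =>
      rw [PySem.Chars.replace.go]
      by_cases hp : [' ', ' '].isPrefixOf (c :: t) = true
      · rw [List.isPrefixOf_iff_prefix] at hp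
        obtain ⟨s₂, hs⟩ := hp
        simp only [List.cons_append, List.nil_append, List.cons.injEq] at hs
        obtain ⟨rfl, rfl⟩ := hs
        rw [if_pos (by rw [List.isPrefixOf_iff_prefix]; exact ⟨s₂, by simp⟩)]
        have hlen : s₂.length ≤ fuel := by simp at h; omega
        rw [show List.drop [' ', ' '].length (' ' :: ' ' :: s₂) = s₂ from rfl,
          show [' '].reverse ++ acc = ' ' :: acc from rfl, ih _ _ hlen]
        simp [halve]
      · rw [if_neg hp]
        have hlen : t.length ≤ fuel := by simp at h; omega
        rw [ih _ _ hlen]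
        have hh : c :: halve t = halve (c :: t) := by
          cases t with
          | nil => simp [halve]
          | cons b t' =>
            have hcb : ¬ (c = ' ' ∧ b = ' ') := by
              rintro ⟨rfl, rfl⟩
              exact hp (by rw [List.isPrefixOf_iff_prefix]; exact ⟨t', by simp⟩)
            simp [halve, hcb]
        simp [hh]

theorem replace_eq_halve (l : List Char) :
    PySem.Chars.replace l [' ', ' '] [' '] = halve l := by
  rw [PySem.Chars.replace]
  simp only [List.isEmpty_cons, if_neg]
  exact replace_go_eq_halve l.length l [] le_rfl

theorem isIn_eq_hasDbl (t : List Char) : PySem.Chars.isIn [' ', ' '] t = hasDbl t := by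
  by_cases h : hasDbl t = true
  · rw [h, (PySem.Chars.isIn_iff_infix _ _).mpr ((hasDbl_iff_infix t).mp h)]
  · simp only [Bool.not_eq_true] at h
    rw [h, (PySem.Chars.isIn_eq_false_iff _ _).mpr (fun hi => by simp [(hasDbl_iff_infix t).mpr hi] at h)]

theorem cleanCollapse_eq_sq : ∀ (fuel : Nat) (t : List Char), t.length ≤ fuel →
    cleanCollapse fuel t = sqz false t := by
  intro fuel
  induction fuel with
  | zero =>
    intro t h
    have : t = [] := by cases t <;> simp_all
    subst this; rfl
  | succ fuel ih =>
    intro t h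
    rw [cleanCollapse, isIn_eq_hasDbl]
    by_cases hd : hasDbl t = true
    · rw [if_pos hd, replace_eq_halve]
      have hlt := halve_length_lt t hd
      rw [ih _ (by omega), sqz_halve]
    · rw [if_neg (by simpa using hd)]
      exact (sqz_id t false (by simpa using hd) (by simp)).symm

theorem filter_eq_keepC (s : List Char) (cf : Bool) :
    (if cf = false then
        s.filter (fun x => decide (32 ≤ x.toNat) && decide (x.toNat ≤ 126))
      else s.filter (fun x => decide (32 ≤ x.toNat) && decide (x.toNat ≤ 126)
                                    && !(invalid_filename_characters.contains x))) =
    s.filter (keepC cf) := by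
  cases cf <;> refine List.filter_congr fun x _ => ?_ <;>
    simp [keepC, Bool.and_assoc]

-- ===== VERDICT (by name: the statement is the Claim_ definition above) =====
theorem clean_input_spec : Claim_equal_clean_input := by
  intro str_input len_limit clean_filename _
  unfold Spec_clean_input clean_input clean_input_alt
  have hf := filter_eq_keepC str_input.toList clean_filename
  simp only [] at hf ⊢
  rw [hf, cleanCollapse_eq_sq _ _ le_rfl, ← cleanGo_eq_sqz_filter]
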